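-- pv_equiv track=rewrite | github.com/harshit25shilsha/AutomateEmail | services/resume_service.py | _is_tech_string
-- ===== SOURCE A (Python) =====
-- _TECH_KEYWORDS = {
--     "lambda", "api gateway", "sns", "sqs", "s3", "kafka", "terraform",
--     "docker", "kubernetes", "redis", "mongodb", "sql", "postgresql",
--     "mysql", "node", "nodejs", "react", "angular", "vue", "python",
--     "java", "spring", "aws", "azure", "gcp", "typescript", "javascript",
--     "graphql", "nestjs", "express", "django", "flask", "hibernate",
--     "firebase", "dynamodb", "elasticsearch", "rabbitmq", "nginx",
--     "jenkins", "webrtc", "sap hana",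
-- }
--
-- def _is_tech_string(text: str) -> bool:
--     if not text:
--         return False
--     lower = text.lower()
--     for kw in _TECH_KEYWORDS:
--         if lower.startswith(kw):
--             return True
--     if text.count(",") >= 2:
--         return True
--     tech_hits = sum(1 for kw in _TECH_KEYWORDS if kw in lower)
--     if tech_hits >= 1:
--         return True
--     return False
-- ===== SOURCE B (Python) =====
-- _TECH_KEYWORDS = {
--     "lambda", "api gateway", "sns", "sqs", "s3", "kafka", "terraform",
--     "docker", "kubernetes", "redis", "mongodb", "sql", "postgresql",
--     "mysql", "node", "nodejs", "react", "angular", "vue", "python",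
--     "java", "spring", "aws", "azure", "gcp", "typescript", "javascript",
--     "graphql", "nestjs", "express", "django", "flask", "hibernate",
--     "firebase", "dynamodb", "elasticsearch", "rabbitmq", "nginx",
--     "jenkins", "webrtc", "sap hana",
-- }
--
-- _KWS = tuple(_TECH_KEYWORDS)
--
--
-- def _is_tech_string(text: str) -> bool:
--     # Single left-to-right scan over positions: at each position, try keywords
--     # anchored there (cheap first-char filter), instead of one full substring
--     # scan of the text per keyword.
--     if not text:
--         return False
--     if text.count(",") >= 2:
--         return True
--     lower = text.lower()
--     for i, ch in enumerate(lower):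
--         for kw in _KWS:
--             if kw[0] == ch and lower.startswith(kw, i):
--                 return True
--     return False
-- ===== Notes on version B (the rewrite author's own statement) =====
-- stated objective: alternative
-- what changed: Replaces A's per-keyword substring scans (plus a redundant startswith pre-loop and a hit-counting sum) with one left-to-right scan over text positions that tries keywords anchored at each position behind a first-character filter.
import Mathlib
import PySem

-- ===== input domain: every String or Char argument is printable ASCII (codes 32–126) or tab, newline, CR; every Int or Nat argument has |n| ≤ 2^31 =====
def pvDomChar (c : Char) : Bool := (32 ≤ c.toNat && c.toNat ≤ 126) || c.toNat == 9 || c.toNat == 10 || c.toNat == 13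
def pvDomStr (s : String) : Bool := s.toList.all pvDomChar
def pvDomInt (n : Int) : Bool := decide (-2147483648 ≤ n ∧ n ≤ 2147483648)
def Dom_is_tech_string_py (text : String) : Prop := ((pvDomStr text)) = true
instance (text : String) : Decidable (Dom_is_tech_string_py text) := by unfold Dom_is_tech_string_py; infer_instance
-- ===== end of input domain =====

-- B is an alternative traversal: one left-to-right scan over positions trying keywords anchored
-- there, instead of A's per-keyword substring scans (plus A's redundant startswith pre-loop).

-- ===== PORT A =====
-- the Python set _TECH_KEYWORDS; its hash iteration order does not affect either result
def techKeywords : List String := [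
    "lambda", "api gateway", "sns", "sqs", "s3", "kafka", "terraform",
    "docker", "kubernetes", "redis", "mongodb", "sql", "postgresql",
    "mysql", "node", "nodejs", "react", "angular", "vue", "python",
    "java", "spring", "aws", "azure", "gcp", "typescript", "javascript",
    "graphql", "nestjs", "express", "django", "flask", "hibernate",
    "firebase", "dynamodb", "elasticsearch", "rabbitmq", "nginx",
    "jenkins", "webrtc", "sap hana"]

def is_tech_string_py (text : String) : Bool :=
  if text.toList.isEmpty then false
  -- Python's local 'lower' is written out inline; 'tech_hits' is the 0/1 generator sum
  else if techKeywords.any (fun kw => PySem.Str.startswith (PySem.Str.lower text) kw) then true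
  else if 2 ≤ PySem.Str.count text "," then true
  else if 1 ≤ (techKeywords.map
      (fun kw => if PySem.Str.isIn kw (PySem.Str.lower text) then (1 : Int) else 0)).sum then true
  else false

-- ===== PORT B =====
-- the 'for i, ch in enumerate(lower)' loop of Source B: recursion over the suffixes of lower;
-- 'kw[0] == ch' is the first-char filter, 'lower.startswith(kw, i)' is isPrefixOf on the suffix
def scanTech : List Char → Bool
  | [] => false
  | c :: rest =>
      techKeywords.any (fun kw => kw.toList.head? == some c && kw.toList.isPrefixOf (c :: rest))
        || scanTech rest

def is_tech_string_py_alt (text : String) : Bool :=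
  if text.toList.isEmpty then false
  else if 2 ≤ PySem.Str.count text "," then true
  else scanTech (PySem.Str.lower text).toList

-- ===== PRECONDITION & SPEC =====
def Spec_is_tech_string_py (text : String) (out : Bool) : Prop := out = is_tech_string_py_alt text
instance (text : String) (out : Bool) : Decidable (Spec_is_tech_string_py text out) := by unfold Spec_is_tech_string_py; infer_instance

-- ===== CLAIM (what is proved, stated in full; the proofs are below) =====
def Claim_equal_is_tech_string_py : Prop := ∀ (text : String), Dom_is_tech_string_py text → Spec_is_tech_string_py text (is_tech_string_py text)

-- ===== LEMMAS AND PROOFS =====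

theorem techKeywords_nonempty : ∀ kw ∈ techKeywords, kw.toList ≠ [] := by decide

theorem any_or_distrib (l : List String) (f g : String → Bool) :
    l.any (fun x => f x || g x) = (l.any f || l.any g) := by
  induction l with
  | nil => rfl
  | cons a t ih =>
      cases hf : f a <;> cases hg : g a <;> simp [List.any_cons, hf, hg, ih]

theorem scanTech_eq (l : List Char) :
    scanTech l = techKeywords.any (fun kw => decide (kw.toList <:+: l)) := by
  induction l with
  | nil => decide
  | cons c rest ih =>
      have h1 : (techKeywords.any fun kw => decide (kw.toList <:+: c :: rest))
          = techKeywords.any (fun kw => decide (kw.toList <+: c :: rest) || decide (kw.toList <:+: rest)) := by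
        apply PySem.List.any_congr_mem
        intro kw _
        simp [List.infix_cons_iff]
      have h2 : ∀ kw ∈ techKeywords,
          (kw.toList.head? == some c && kw.toList.isPrefixOf (c :: rest))
            = decide (kw.toList <+: c :: rest) := by
        intro kw hkw
        cases hl : kw.toList with
        | nil => exact absurd hl (techKeywords_nonempty kw hkw)
        | cons a t =>
            by_cases hac : a = c
            · subst hac
              rw [Bool.eq_iff_iff]
              simp [List.isPrefixOf_iff_prefix, List.cons_prefix_cons]
            · simp [List.cons_prefix_cons, hac]
      rw [scanTech, ih, PySem.List.any_congr_mem h2, h1, any_or_distrib]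

theorem isIn_eq_decide_infix (kw s : String) :
    PySem.Str.isIn kw s = decide (kw.toList <:+: s.toList) := by
  rw [Bool.eq_iff_iff, decide_eq_true_iff]
  exact PySem.Str.isIn_iff_infix kw s

theorem startswith_imp_isIn (s kw : String)
    (h : PySem.Str.startswith s kw = true) : PySem.Str.isIn kw s = true := by
  rw [isIn_eq_decide_infix, decide_eq_true_iff]
  simp only [PySem.Str.startswith_eq] at h
  exact List.IsPrefix.isInfix ((PySem.Chars.startswith_iff _ _).mp h)

-- ===== VERDICT (by name: the statement is the Claim_ definition above) =====
theorem is_tech_string_py_spec : Claim_equal_is_tech_string_py := by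
  intro text _
  unfold Spec_is_tech_string_py is_tech_string_py is_tech_string_py_alt
  by_cases he : text.toList.isEmpty = true
  · rw [if_pos he, if_pos he]
  · rw [if_neg he, if_neg he]
    by_cases hs : (techKeywords.any fun kw =>
        PySem.Str.startswith (PySem.Str.lower text) kw) = true
    · rw [if_pos hs]
      by_cases hc : 2 ≤ PySem.Str.count text ","
      · rw [if_pos hc]
      · rw [if_neg hc, scanTech_eq,
          PySem.List.any_congr_mem (fun kw _ => (isIn_eq_decide_infix kw (PySem.Str.lower text)).symm)]
        rcases List.any_eq_true.mp hs with ⟨kw, hkw, hsw⟩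
        exact (List.any_eq_true.mpr ⟨kw, hkw, startswith_imp_isIn (PySem.Str.lower text) kw hsw⟩).symm
    · rw [if_neg hs]
      by_cases hc : 2 ≤ PySem.Str.count text ","
      · rw [if_pos hc, if_pos hc]
      · rw [if_neg hc, if_neg hc, scanTech_eq,
          PySem.List.any_congr_mem (fun kw _ => (isIn_eq_decide_infix kw (PySem.Str.lower text)).symm)]
        simp only [PySem.List.sum_map_ite_one_zero]
        by_cases hh : (techKeywords.any fun kw => PySem.Str.isIn kw (PySem.Str.lower text)) = true
        · rcases List.any_eq_true.mp hh with ⟨kw, hkw, hin⟩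
          have hpos : 0 < techKeywords.countP (fun kw => PySem.Str.isIn kw (PySem.Str.lower text)) :=
            List.countP_pos_iff.mpr ⟨kw, hkw, hin⟩
          rw [if_pos (by exact_mod_cast hpos), hh]
        · have hz : techKeywords.countP (fun kw => PySem.Str.isIn kw (PySem.Str.lower text)) = 0 :=
            Nat.eq_zero_of_not_pos fun hp =>
              have ⟨kw, hkw, hin⟩ := List.countP_pos_iff.mp hp
              hh (List.any_eq_true.mpr ⟨kw, hkw, hin⟩)
          rw [hz, Bool.eq_false_iff.mpr hh, if_neg (by norm_num)]
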